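-- pv_equiv track=rewrite | github.com/samartspace03/Python-with-zero-to-hero-level-explaination | 5.2.datatype-string._gfg_sol.py | countKMinus1DistinctSubstrings
-- ===== SOURCE A (Python) =====
-- def countKMinus1DistinctSubstrings(s, k):
--     count = 0
--
--     for i in range(len(s) - k + 1):  # Slide a window of length k
--         substr = s[i:i+k]  # Get substring of length k
--         unique_chars = set(substr)  # Get unique characters in substring
--
--         if len(unique_chars) == k - 1:
--             count += 1
--
--     return count
-- ===== SOURCE B (Python) =====
-- def countKMinus1DistinctSubstrings(s, k):
--     n = len(s)
--     if k < 1 or k > n: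
--         return 0
--     freq = {}
--     distinct = 0
--     for c in s[:k]:
--         freq[c] = freq.get(c, 0) + 1
--         if freq[c] == 1:
--             distinct += 1
--     count = 1 if distinct == k - 1 else 0
--     for c_in, c_out in zip(s[k:], s):
--         freq[c_in] = freq.get(c_in, 0) + 1
--         if freq[c_in] == 1:
--             distinct += 1
--         freq[c_out] -= 1
--         if freq[c_out] == 0:
--             distinct -= 1
--         if distinct == k - 1:
--             count += 1
--     return count
-- ===== Notes on version B (the rewrite author's own statement) =====
-- stated objective: faster
-- what changed: Replaces per-window set construction with a single sliding-window pass maintaining a character frequency dict and an incremental distinct-character count.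
import Mathlib
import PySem

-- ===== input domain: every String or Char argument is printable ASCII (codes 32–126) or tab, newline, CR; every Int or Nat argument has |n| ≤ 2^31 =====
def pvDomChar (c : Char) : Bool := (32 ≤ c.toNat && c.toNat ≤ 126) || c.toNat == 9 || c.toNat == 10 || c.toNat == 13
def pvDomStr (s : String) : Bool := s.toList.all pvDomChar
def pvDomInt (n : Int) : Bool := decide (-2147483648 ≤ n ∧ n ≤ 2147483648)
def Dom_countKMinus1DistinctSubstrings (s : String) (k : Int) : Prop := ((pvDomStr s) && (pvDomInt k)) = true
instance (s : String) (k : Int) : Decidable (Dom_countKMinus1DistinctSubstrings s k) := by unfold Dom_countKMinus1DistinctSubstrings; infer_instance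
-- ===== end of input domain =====

-- B replaces A's per-window set construction by one sliding-window pass with a frequency
-- dict and an incrementally maintained distinct-character count (objective: faster).

-- ===== PORT A =====
def countKMinus1DistinctSubstrings (s : String) (k : Int) : Int :=
  (PySem.List.pyRange 0 (PySem.Str.len s - k + 1) 1).foldl
    (fun count i =>
      let substr := PySem.List.slice s.toList (some i) (some (i + k))  -- s[i:i+k] (code points)
      let uniqueChars := PySem.Set.ofList substr                       -- set(substr)
      if PySem.List.len uniqueChars = k - 1 then count + 1 else count)
    0

-- ===== PORT B =====
-- one step of the first loop of Source B: freq[c] = freq.get(c, 0) + 1; if freq[c] == 1: distinct += 1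
def pvStepIn (st : PySem.Dict Char Int × Int) (c : Char) : PySem.Dict Char Int × Int :=
  let freq := st.1.modify c 0 (· + 1)
  if freq.getD c 0 = 1 then (freq, st.2 + 1) else (freq, st.2)

-- one step of the second loop of Source B (p = (c_in, c_out)); `freq[c_out] -= 1` never raises
-- (c_out is in the current window so the key is present), hence modify with default 0 is exact
def pvStepSlide (k : Int) (st : PySem.Dict Char Int × Int × Int) (p : Char × Char) :
    PySem.Dict Char Int × Int × Int :=
  let freq1 := st.1.modify p.1 0 (· + 1)
  let d1 := if freq1.getD p.1 0 = 1 then st.2.1 + 1 else st.2.1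
  let freq2 := freq1.modify p.2 0 (· - 1)
  let d2 := if freq2.getD p.2 0 = 0 then d1 - 1 else d1
  let cnt := if d2 = k - 1 then st.2.2 + 1 else st.2.2
  (freq2, d2, cnt)

def countKMinus1DistinctSubstrings_alt (s : String) (k : Int) : Int :=
  let n := PySem.Str.len s
  if k < 1 ∨ n < k then 0
  else
    let init := (PySem.List.slice s.toList none (some k)).foldl pvStepIn (PySem.Dict.empty, 0)
    let count0 : Int := if init.2 = k - 1 then 1 else 0
    let res := ((PySem.List.slice s.toList (some k) none).zip s.toList).foldl (pvStepSlide k)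
      (init.1, init.2, count0)
    res.2.2

-- ===== PRECONDITION & SPEC =====
def Spec_countKMinus1DistinctSubstrings (s : String) (k : Int) (out : Int) : Prop := out = countKMinus1DistinctSubstrings_alt s k
instance (s : String) (k : Int) (out : Int) : Decidable (Spec_countKMinus1DistinctSubstrings s k out) := by unfold Spec_countKMinus1DistinctSubstrings; infer_instance

-- ===== CLAIM (what is proved, stated in full; the proofs are below) =====
def Claim_equal_countKMinus1DistinctSubstrings : Prop := ∀ (s : String) (k : Int), Dom_countKMinus1DistinctSubstrings s k → Spec_countKMinus1DistinctSubstrings s k (countKMinus1DistinctSubstrings s k)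

-- ===== LEMMAS AND PROOFS =====

-- the window of length K starting at t
def pvWin (l : List Char) (K t : Nat) : List Char := (l.drop t).take K
-- number of distinct characters
def pvDcount (w : List Char) : Nat := (PySem.Set.ofList w).length

theorem pvDcount_eq_card (w : List Char) : pvDcount w = w.toFinset.card := by
  have hnd : (PySem.Set.ofList w).Nodup := PySem.Set.nodup_ofList w
  have hmem : (PySem.Set.ofList w).toFinset = w.toFinset := by
    ext c; simp [PySem.Set.mem_ofList]
  calc pvDcount w = (PySem.Set.ofList w).toFinset.card :=
        (List.toFinset_card_of_nodup hnd).symm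
    _ = w.toFinset.card := by rw [hmem]

theorem pvDcount_append (w : List Char) (c : Char) :
    pvDcount (w ++ [c]) = pvDcount w + (if c ∈ w then 0 else 1) := by
  rw [pvDcount_eq_card, pvDcount_eq_card]
  have hins : (w ++ [c]).toFinset = insert c w.toFinset := by
    rw [List.toFinset_append]; simp
  rw [hins]
  by_cases h : c ∈ w
  · rw [Finset.card_insert_of_mem (List.mem_toFinset.2 h)]; simp [h]
  · rw [Finset.card_insert_of_notMem (fun hc => h (List.mem_toFinset.1 hc))]; simp [h]

theorem pvDcount_cons (c : Char) (w : List Char) :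
    pvDcount (c :: w) = pvDcount w + (if c ∈ w then 0 else 1) := by
  rw [pvDcount_eq_card, pvDcount_eq_card, List.toFinset_cons]
  by_cases h : c ∈ w
  · rw [Finset.card_insert_of_mem (List.mem_toFinset.2 h)]; simp [h]
  · rw [Finset.card_insert_of_notMem (fun hc => h (List.mem_toFinset.1 hc))]; simp [h]

-- a fold that adds 1 when p holds is a countP
theorem pvFoldlCount {α : Type} (p : α → Prop) [DecidablePred p] (xs : List α) (acc : Int) :
    xs.foldl (fun c x => if p x then c + 1 else c) acc
      = acc + (xs.countP (fun x => decide (p x)) : Int) := by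
  induction xs generalizing acc with
  | nil => simp
  | cons x xs ih =>
    simp only [List.foldl_cons, List.countP_cons, ih]
    split_ifs <;> simp_all <;> push_cast <;> omega

-- the shared "add one char" step
theorem pvAddSpec (d : PySem.Dict Char Int) (dist : Int) (acc : List Char) (c : Char)
    (hd : ∀ c', d.getD c' 0 = (acc.count c' : Int)) (hdist : dist = (pvDcount acc : Int)) :
    (∀ c', (d.modify c 0 (· + 1)).getD c' 0 = ((acc ++ [c]).count c' : Int)) ∧
    ((if (d.modify c 0 (· + 1)).getD c 0 = 1 then dist + 1 else dist)
      = (pvDcount (acc ++ [c]) : Int)) := by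
  have key : ∀ c', (d.modify c 0 (· + 1)).getD c' 0 = ((acc ++ [c]).count c' : Int) := by
    intro c'
    rw [PySem.Dict.getD_modify]
    by_cases h : c' = c
    · subst h; rw [if_pos rfl, hd]; simp
    · rw [if_neg h, hd]
      have h2 : ¬c = c' := fun hc => h hc.symm
      simp [List.count_append, List.count_singleton, h2]
  refine ⟨key, ?_⟩
  rw [key c, pvDcount_append]
  have hc : (acc ++ [c]).count c = acc.count c + 1 := by simp
  rw [hc, hdist]
  by_cases hmem : c ∈ acc
  · have h1 : 0 < acc.count c := List.count_pos_iff.2 hmem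
    rw [if_neg (by push_cast; omega), if_pos hmem]
    push_cast; ring
  · have h0 : acc.count c = 0 := List.count_eq_zero.2 hmem
    rw [h0, if_pos (by norm_num), if_neg hmem]
    push_cast; ring

theorem pvPhase1 : ∀ (w acc : List Char) (d : PySem.Dict Char Int) (dist : Int),
    (∀ c', d.getD c' 0 = (acc.count c' : Int)) → dist = (pvDcount acc : Int) →
    (∀ c', (w.foldl pvStepIn (d, dist)).1.getD c' 0 = ((acc ++ w).count c' : Int)) ∧
    (w.foldl pvStepIn (d, dist)).2 = (pvDcount (acc ++ w) : Int) := by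
  intro w
  induction w with
  | nil =>
    intro acc d dist hd hdist
    simpa using ⟨hd, hdist⟩
  | cons c w ih =>
    intro acc d dist hd hdist
    obtain ⟨k1, k2⟩ := pvAddSpec d dist acc c hd hdist
    have hstep : pvStepIn (d, dist) c
        = (d.modify c 0 (· + 1),
           if (d.modify c 0 (· + 1)).getD c 0 = 1 then dist + 1 else dist) := by
      simp only [pvStepIn]; split_ifs <;> rfl
    rw [List.foldl_cons, hstep]
    have := ih (acc ++ [c]) _ _ k1 k2
    simpa [List.append_assoc] using this

set_option maxRecDepth 10000 in
theorem pvPhase2 (l : List Char) (K : Nat) (k : Int) (hk : (K : Int) = k) (hK : 1 ≤ K) :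
    ∀ (m t : Nat) (d : PySem.Dict Char Int) (dist cnt : Int),
    l.length = K + t + m →
    (∀ c', d.getD c' 0 = ((pvWin l K t).count c' : Int)) →
    dist = (pvDcount (pvWin l K t) : Int) →
    (((l.drop (K + t)).zip (l.drop t)).foldl (pvStepSlide k) (d, dist, cnt)).2.2
      = cnt + (((List.range m).countP
          (fun j => decide ((pvDcount (pvWin l K (t + 1 + j)) : Int) = k - 1))) : Int) := by
  obtain ⟨K', rfl⟩ : ∃ K'', K = K'' + 1 := ⟨K - 1, by omega⟩
  intro m
  induction m with
  | zero =>
    intro t d dist cnt hlen hd hdist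
    have hnil : l.drop (K' + 1 + t) = [] := List.drop_eq_nil_of_le (by omega)
    simp [hnil]
  | succ m ih =>
    intro t d dist cnt hlen hd hdist
    have ht : t < l.length := by omega
    have hKt : K' + 1 + t < l.length := by omega
    rw [List.drop_eq_getElem_cons hKt, List.drop_eq_getElem_cons ht, List.zip_cons_cons,
      List.foldl_cons]
    -- window decompositions
    have e1 : pvWin l (K' + 1) t = l[t] :: (l.drop (t + 1)).take K' := by
      unfold pvWin
      rw [List.drop_eq_getElem_cons ht, List.take_succ_cons]
    have e2 : pvWin l (K' + 1) (t + 1) = (l.drop (t + 1)).take K' ++ [l[K' + 1 + t]] := by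
      unfold pvWin
      rw [List.take_succ]
      congr 1
      rw [List.getElem?_drop]
      have hidx : t + 1 + K' = K' + 1 + t := by omega
      rw [hidx, List.getElem?_eq_getElem hKt]
      rfl
    have e3 : pvWin l (K' + 1) t ++ [l[K' + 1 + t]] = l[t] :: pvWin l (K' + 1) (t + 1) := by
      rw [e1, e2]; rfl
    obtain ⟨k1, k2⟩ := pvAddSpec d dist (pvWin l (K' + 1) t) (l[K' + 1 + t]) hd hdist
    rw [e3] at k1 k2
    simp only [pvStepSlide]
    have hd2 : ∀ c', ((d.modify (l[K' + 1 + t]) 0 (· + 1)).modify (l[t]) 0 (· - 1)).getD c' 0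
        = ((pvWin l (K' + 1) (t + 1)).count c' : Int) := by
      intro c'
      rw [PySem.Dict.getD_modify]
      by_cases h : c' = l[t]
      · rw [if_pos h, k1, h, List.count_cons_self]
        push_cast; ring
      · rw [if_neg h, k1]
        simp only [List.count_cons]
        have h2 : ¬(l[t] = c') := fun hc => h hc.symm
        simp [h2]
    have hdist2 : (if ((d.modify (l[K' + 1 + t]) 0 (· + 1)).modify (l[t]) 0 (· - 1)).getD
            (l[t]) 0 = 0
          then (if (d.modify (l[K' + 1 + t]) 0 (· + 1)).getD (l[K' + 1 + t]) 0 = 1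
                then dist + 1 else dist) - 1
          else (if (d.modify (l[K' + 1 + t]) 0 (· + 1)).getD (l[K' + 1 + t]) 0 = 1
                then dist + 1 else dist))
        = (pvDcount (pvWin l (K' + 1) (t + 1)) : Int) := by
      rw [hd2 (l[t]), k2, pvDcount_cons]
      by_cases hbm : l[t] ∈ pvWin l (K' + 1) (t + 1)
      · have hpos : 0 < (pvWin l (K' + 1) (t + 1)).count (l[t]) := List.count_pos_iff.2 hbm
        rw [if_neg (by push_cast; omega), if_pos hbm]
        push_cast; ring
      · have h0 : (pvWin l (K' + 1) (t + 1)).count (l[t]) = 0 := List.count_eq_zero.2 hbm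
        rw [h0, if_pos (by norm_num), if_neg hbm]
        push_cast; ring
    have harr : K' + 1 + t + 1 = K' + 1 + (t + 1) := by omega
    rw [harr, ih (t + 1) _ _ _ (by omega) hd2 hdist2]
    rw [hdist2]
    have hsplit : List.countP
          (fun j => decide ((pvDcount (pvWin l (K' + 1) (t + 1 + j)) : Int) = k - 1))
          (List.range (m + 1))
        = (if (pvDcount (pvWin l (K' + 1) (t + 1)) : Int) = k - 1 then 1 else 0)
          + List.countP
              (fun j => decide ((pvDcount (pvWin l (K' + 1) (t + 1 + 1 + j)) : Int) = k - 1))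
              (List.range m) := by
      rw [List.range_succ_eq_map, List.countP_cons, List.countP_map]
      have hmap : List.countP
            ((fun j => decide ((pvDcount (pvWin l (K' + 1) (t + 1 + j)) : Int) = k - 1)) ∘
              Nat.succ) (List.range m)
          = List.countP
              (fun j => decide ((pvDcount (pvWin l (K' + 1) (t + 1 + 1 + j)) : Int) = k - 1))
              (List.range m) := by
        apply List.countP_congr
        intro j _
        have e : t + 1 + (j + 1) = t + 1 + 1 + j := by omega
        rw [Function.comp_apply, Nat.succ_eq_add_one, e]
      rw [hmap]
      simp only [Nat.add_zero, decide_eq_true_eq]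
      split_ifs <;> omega
    rw [hsplit]
    split_ifs with hcond
    · push_cast; ring
    · push_cast; ring

theorem pvLenOfList (w : List Char) :
    PySem.List.len (PySem.Set.ofList w) = (pvDcount w : Int) := by
  simp [pvDcount]

theorem pvMain (s : String) (k : Int) :
    countKMinus1DistinctSubstrings s k = countKMinus1DistinctSubstrings_alt s k := by
  have hA : countKMinus1DistinctSubstrings s k
      = 0 + (((PySem.List.pyRange 0 (PySem.Str.len s - k + 1) 1).countP
          (fun i => decide (PySem.List.len (PySem.Set.ofList
            (PySem.List.slice s.toList (some i) (some (i + k)))) = k - 1))) : Int) :=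
    pvFoldlCount _ _ _
  rw [hA, zero_add]
  have hlen : PySem.Str.len s = (s.toList.length : Int) := by
    simp
  by_cases hk1 : k < 1
  · -- predicate is never true (a set has nonnegative size, k - 1 < 0), and B returns 0 at once
    rw [countKMinus1DistinctSubstrings_alt]
    rw [if_pos (Or.inl hk1)]
    have hz : (PySem.List.pyRange 0 (PySem.Str.len s - k + 1) 1).countP
        (fun i => decide (PySem.List.len (PySem.Set.ofList
          (PySem.List.slice s.toList (some i) (some (i + k)))) = k - 1)) = 0 := by
      apply List.countP_eq_zero.2
      intro i _
      simp only [pvLenOfList, decide_eq_true_eq]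
      omega
    rw [hz]
    simp
  · push_neg at hk1
    by_cases hkn : PySem.Str.len s < k
    · -- range(len(s) - k + 1) is empty, and B returns 0 at once
      rw [countKMinus1DistinctSubstrings_alt, if_pos (Or.inr hkn)]
      rw [PySem.List.pyRange_one_eq_nil (by rw [hlen] at hkn ⊢; omega)]
      simp
    · -- main case: 1 ≤ k ≤ len(s)
      push_neg at hkn
      obtain ⟨K, hK⟩ : ∃ K : Nat, (K : Int) = k := ⟨k.toNat, Int.toNat_of_nonneg (by omega)⟩
      have hK1 : 1 ≤ K := by omega
      have hKn : K ≤ s.toList.length := by rw [hlen] at hkn; omega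
      rw [PySem.List.pyRange_one, List.countP_map]
      have hto : (PySem.Str.len s - k + 1 - 0).toNat = s.toList.length - K + 1 := by
        rw [hlen]; omega
      rw [hto]
      have hpred : ∀ j : Nat, PySem.List.slice s.toList (some ((0:Int) + (j:Int)))
          (some ((0:Int) + (j:Int) + k)) = pvWin s.toList K j := by
        intro j
        have h0 : (0:Int) + (j:Int) = (j:Int) := by ring
        rw [h0]
        have h1 : (j:Int) + k = (j:Int) + (K:Int) := by rw [hK]
        rw [h1, PySem.List.slice_natCast_add]
        rfl
      have hAc : List.countP ((fun i => decide (PySem.List.len (PySem.Set.ofList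
            (PySem.List.slice s.toList (some i) (some (i + k)))) = k - 1)) ∘
              (fun j : Nat => (0:Int) + ↑j))
            (List.range (s.toList.length - K + 1))
          = List.countP (fun j => decide ((pvDcount (pvWin s.toList K j) : Int) = k - 1))
            (List.range (s.toList.length - K + 1)) := by
        apply List.countP_congr
        intro j _
        rw [Function.comp_apply, hpred j, pvLenOfList]
      rw [hAc]
      -- B side
      simp only [countKMinus1DistinctSubstrings_alt]
      rw [if_neg (by push_neg; exact ⟨by omega, by omega⟩)]
      rw [← hK, PySem.List.slice_to_natCast, PySem.List.slice_from_natCast]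
      have hwin0 : pvWin s.toList K 0 = s.toList.take K := by simp [pvWin]
      obtain ⟨h1, h2⟩ := pvPhase1 (s.toList.take K) [] PySem.Dict.empty 0
        (by intro c'; simp) (by simp [pvDcount, PySem.Set.ofList])
      rw [List.nil_append] at h1 h2
      have h1' : ∀ c', ((s.toList.take K).foldl pvStepIn (PySem.Dict.empty, 0)).1.getD c' 0
          = ((pvWin s.toList K 0).count c' : Int) := by
        intro c'; rw [hwin0]; exact h1 c'
      have h2' : ((s.toList.take K).foldl pvStepIn (PySem.Dict.empty, 0)).2
          = (pvDcount (pvWin s.toList K 0) : Int) := by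
        rw [hwin0]; exact h2
      have hph2 := pvPhase2 s.toList K (↑K) rfl hK1 (s.toList.length - K) 0 _ _
        (if ((s.toList.take K).foldl pvStepIn (PySem.Dict.empty, 0)).2 = (K:Int) - 1
         then (1:Int) else 0)
        (by omega) h1' h2'
      rw [Nat.add_zero, List.drop_zero] at hph2
      rw [hph2, h2']
      have hsplit : List.countP
            (fun j => decide ((pvDcount (pvWin s.toList K j) : Int) = (K:Int) - 1))
            (List.range (s.toList.length - K + 1))
          = (if (pvDcount (pvWin s.toList K 0) : Int) = (K:Int) - 1 then 1 else 0)
            + List.countP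
                (fun j => decide ((pvDcount (pvWin s.toList K (0 + 1 + j)) : Int) = (K:Int) - 1))
                (List.range (s.toList.length - K)) := by
        rw [List.range_succ_eq_map, List.countP_cons, List.countP_map]
        have hmap : List.countP
              ((fun j => decide ((pvDcount (pvWin s.toList K j) : Int) = (K:Int) - 1)) ∘
                Nat.succ) (List.range (s.toList.length - K))
            = List.countP
                (fun j => decide ((pvDcount (pvWin s.toList K (0 + 1 + j)) : Int) = (K:Int) - 1))
                (List.range (s.toList.length - K)) := by
          apply List.countP_congr
          intro j _
          rw [Function.comp_apply, Nat.succ_eq_add_one]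
          have e : j + 1 = 0 + 1 + j := by omega
          rw [e]
        rw [hmap]
        simp only [decide_eq_true_eq]
        split_ifs <;> omega
      rw [hsplit]
      split_ifs with hcond
      · push_cast; ring
      · push_cast; ring

-- ===== VERDICT (by name: the statement is the Claim_ definition above) =====
theorem countKMinus1DistinctSubstrings_spec : Claim_equal_countKMinus1DistinctSubstrings := by
  intro s k _
  exact pvMain s k
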